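-- pv_equiv track=rewrite | github.com/megascienta/sciona | src/sciona/code_analysis/tools/call_extraction_queries.py | normalize_call_identifiers
-- ===== SOURCE A (Python) =====
-- from typing import Sequence
--
-- def normalize_call_identifiers(
--     resolved_calls: Sequence[tuple[str, str, str, Sequence[str]]],
-- ) -> list[tuple[str, str, str, list[str]]]:
--     terminal_map_by_scope: dict[tuple[str, str], dict[str, str | None]] = {}
--     for language, qualified, node_type, identifiers in resolved_calls:
--         scope = _module_scope_for_call(qualified, node_type)
--         bucket = terminal_map_by_scope.setdefault((language, scope), {})
--         for identifier in identifiers: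
--             if "." not in identifier:
--                 continue
--             terminal = identifier.rsplit(".", 1)[-1]
--             existing = bucket.get(terminal)
--             if existing is None and terminal in bucket:
--                 continue
--             if existing is None:
--                 bucket[terminal] = identifier
--             elif existing != identifier:
--                 bucket[terminal] = None
--     normalized: list[tuple[str, str, str, list[str]]] = []
--     for language, qualified, node_type, identifiers in resolved_calls:
--         scope = _module_scope_for_call(qualified, node_type)
--         terminal_map = terminal_map_by_scope.get((language, scope), {})
--         updated: list[str] = []
--         for identifier in identifiers:
--             if "." in identifier:
--                 updated.append(identifier)
--             else:
--                 mapped = terminal_map.get(identifier)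
--                 if mapped:
--                     updated.append(mapped)
--                 else:
--                     updated.append(identifier)
--         normalized.append((language, qualified, node_type, updated))
--     return normalized
--
-- def _module_scope_for_call(qualified_name: str, node_type: str) -> str:
--     parts = qualified_name.split(".")
--     if node_type == "method":
--         if len(parts) > 2:
--             return ".".join(parts[:-2])
--         return qualified_name
--     if len(parts) > 1:
--         return ".".join(parts[:-1])
--     return qualified_name
-- ===== SOURCE B (Python) =====
-- def normalize_call_identifiers(resolved_calls):
--     # Dict-free: each short name is resolved by a direct scan over all
--     # same-scope identifiers; no terminal map is ever materialized.
--     return [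
--         (language, qualified, node_type,
--          [i if "." in i
--           else (_resolve_short(resolved_calls, language,
--                                _module_scope_for_call(qualified, node_type), i) or i)
--           for i in identifiers])
--         for language, qualified, node_type, identifiers in resolved_calls
--     ]
--
-- def _resolve_short(resolved_calls, language, scope, short):
--     # The unique dotted identifier in (language, scope) ending in '.'+short, else None.
--     found = None
--     for lang2, qualified2, node_type2, identifiers2 in resolved_calls:
--         if lang2 != language or _module_scope_for_call(qualified2, node_type2) != scope:
--             continue
--         for full in identifiers2:
--             if "." in full and full.rsplit(".", 1)[-1] == short:
--                 if found is None:
--                     found = full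
--                 elif found != full:
--                     return None
--     return found
--
-- def _module_scope_for_call(qualified_name, node_type):
--     parts = qualified_name.split(".")
--     if node_type == "method":
--         return ".".join(parts[:-2]) if len(parts) > 2 else qualified_name
--     return ".".join(parts[:-1]) if len(parts) > 1 else qualified_name
-- ===== Notes on version B (the rewrite author's own statement) =====
-- stated objective: simpler
-- what changed: Eliminates the dict-of-dicts terminal-map machinery entirely: each short identifier is resolved on demand by a direct rescan of all same-(language,scope) identifiers, returning the unique dotted identifier with that terminal suffix or None on conflict; the output is built by comprehensions.
import Mathlib
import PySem

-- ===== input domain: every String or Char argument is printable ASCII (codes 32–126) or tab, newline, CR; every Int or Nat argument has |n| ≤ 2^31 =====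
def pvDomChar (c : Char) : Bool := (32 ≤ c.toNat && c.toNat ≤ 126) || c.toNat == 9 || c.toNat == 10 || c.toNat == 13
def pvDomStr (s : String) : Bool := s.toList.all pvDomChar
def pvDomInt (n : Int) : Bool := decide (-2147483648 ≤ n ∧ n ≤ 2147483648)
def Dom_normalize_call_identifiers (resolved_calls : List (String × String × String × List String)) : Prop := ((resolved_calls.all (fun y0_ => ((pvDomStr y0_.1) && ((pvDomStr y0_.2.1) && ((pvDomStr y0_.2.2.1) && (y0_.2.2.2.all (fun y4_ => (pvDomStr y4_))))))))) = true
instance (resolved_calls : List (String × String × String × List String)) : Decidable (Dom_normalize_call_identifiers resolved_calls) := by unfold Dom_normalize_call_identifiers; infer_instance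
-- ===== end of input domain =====

-- B drops A's dict-of-dicts terminal maps entirely: each short identifier is resolved by a
-- direct rescan of the same-(language, scope) identifiers (objective: simpler, not faster).

-- shared module-level helper _module_scope_for_call (used verbatim by both Pythons)
def module_scope_for_call (qualified_name : String) (node_type : String) : String :=
  let parts := (PySem.Str.split? qualified_name ".").getD []  -- separator is the literal ".", never empty, so split? is always `some`: exact
  if node_type = "method" then
    if parts.length > 2 then PySem.Str.join "." (parts.take (parts.length - 2)) else qualified_name
  else
    if parts.length > 1 then PySem.Str.join "." (parts.take (parts.length - 1)) else qualified_name

-- identifier.rsplit(".", 1)[-1]: the suffix after the LAST '.' (exact; both programs only apply it when '.' occurs)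
def terminalOf (s : String) : String :=
  String.ofList ((s.toList.reverse.takeWhile (fun c => c ≠ '.')).reverse)

-- the (language, scope) grouping key A computes for an entry
def keyOf (e : String × String × String × List String) : String × String :=
  (e.1, module_scope_for_call e.2.1 e.2.2.1)

-- ===== PORT A =====
-- A's inner first-pass loop body over one identifier (bucket values: Option String, none = conflict sentinel)
def stepA (b : PySem.Dict String (Option String)) (identifier : String) : PySem.Dict String (Option String) :=
  if PySem.Str.isIn "." identifier then
    let terminal := terminalOf identifier
    match b.get? terminal with
    | some none => b                                 -- existing is None and terminal in bucket: continue
    | none => b.insert terminal (some identifier)    -- existing is None (terminal absent): record first full id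
    | some (some existing) =>                        -- elif existing != identifier: conflict
        if existing ≠ identifier then b.insert terminal none else b
  else b

-- A's first pass (the mutated setdefault-alias bucket is re-inserted: same dict value)
def firstPassA (resolved_calls : List (String × String × String × List String)) :
    PySem.Dict (String × String) (PySem.Dict String (Option String)) :=
  resolved_calls.foldl
    (fun m e =>
      (m.setdefault (keyOf e) PySem.Dict.empty).insert (keyOf e)
        ((e.2.2.2).foldl stepA
          ((m.setdefault (keyOf e) PySem.Dict.empty).getD (keyOf e) PySem.Dict.empty)))
    PySem.Dict.empty

-- terminal_map.get(identifier) applied to one identifier in A's second pass ('if mapped:' = non-None, non-empty)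
def applyA (tm : PySem.Dict String (Option String)) (identifier : String) : String :=
  if PySem.Str.isIn "." identifier then identifier
  else
    match tm.get? identifier with
    | some (some mapped) => if mapped = "" then identifier else mapped
    | _ => identifier

-- one iteration of A's second-pass outer loop: look the scope's terminal_map up, rebuild the identifier list
def secondA (tms : PySem.Dict (String × String) (PySem.Dict String (Option String)))
    (e : String × String × String × List String) : String × String × String × List String :=
  (e.1, e.2.1, e.2.2.1,
    (e.2.2.2).foldl
      (fun updated identifier => updated ++ [applyA (tms.getD (keyOf e) PySem.Dict.empty) identifier])
      [])

def normalize_call_identifiers (resolved_calls : List (String × String × String × List String)) : List (String × String × String × List String) :=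
  let terminal_map_by_scope := firstPassA resolved_calls
  resolved_calls.foldl (fun normalized e => normalized ++ [secondA terminal_map_by_scope e]) []

-- ===== PORT B =====
-- _resolve_short's inner loop over one entry's identifiers:
-- `none` = the early `return None` (conflict); `some found` = fall through with the current found
def resolveIds (short : String) : List String → Option String → Option (Option String)
  | [], found => some found
  | full :: rest, found =>
      if PySem.Str.isIn "." full && terminalOf full == short then
        match found with
        | none => resolveIds short rest (some full)       -- found is None: found = full
        | some f =>
            if f = full then resolveIds short rest (some f)
            else none                                      -- elif found != full: return None
      else resolveIds short rest found

-- _resolve_short's outer loop over resolved_calls (the `continue` on a language/scope mismatch)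
def resolveEntries (language scope short : String) :
    List (String × String × String × List String) → Option String → Option String
  | [], found => found
  | e :: rest, found =>
      if e.1 == language && module_scope_for_call e.2.1 e.2.2.1 == scope then
        match resolveIds short e.2.2.2 found with
        | none => none                                     -- early `return None` propagates
        | some f => resolveEntries language scope short rest f
      else resolveEntries language scope short rest found

def resolve_short (resolved_calls : List (String × String × String × List String))
    (language scope short : String) : Option String :=
  resolveEntries language scope short resolved_calls none

def normalize_call_identifiers_alt (resolved_calls : List (String × String × String × List String)) : List (String × String × String × List String) :=
  resolved_calls.map (fun e =>
    (e.1, e.2.1, e.2.2.1,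
      (e.2.2.2).map (fun i =>
        if PySem.Str.isIn "." i then i
        else
          match resolve_short resolved_calls e.1 (module_scope_for_call e.2.1 e.2.2.1) i with
          | some v => if v = "" then i else v              -- `resolve(...) or i`
          | none => i)))

-- ===== PRECONDITION & SPEC =====
def Spec_normalize_call_identifiers (resolved_calls : List (String × String × String × List String)) (out : List (String × String × String × List String)) : Prop := out = normalize_call_identifiers_alt resolved_calls
instance (resolved_calls : List (String × String × String × List String)) (out : List (String × String × String × List String)) : Decidable (Spec_normalize_call_identifiers resolved_calls out) := by unfold Spec_normalize_call_identifiers; infer_instance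

-- ===== CLAIM (what is proved, stated in full; the proofs are below) =====
def Claim_equal_normalize_call_identifiers : Prop := ∀ (resolved_calls : List (String × String × String × List String)), Dom_normalize_call_identifiers resolved_calls → Spec_normalize_call_identifiers resolved_calls (normalize_call_identifiers resolved_calls)

-- ===== LEMMAS AND PROOFS =====

-- characterization of A's grouping fold: the bucket at k is the inner fold over the ids of entries keyed k
theorem pass_getD {β : Type} (f : β → String → β)
    (rc : List (String × String × String × List String))
    (m : PySem.Dict (String × String) β) (k : String × String) (d0 : β) :
    (rc.foldl
      (fun m e =>
        (m.setdefault (keyOf e) d0).insert (keyOf e)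
          ((e.2.2.2).foldl f ((m.setdefault (keyOf e) d0).getD (keyOf e) d0))) m).getD k d0
    = ((rc.filter (fun e => keyOf e == k)).flatMap (fun e => e.2.2.2)).foldl f (m.getD k d0) := by
  induction rc generalizing m with
  | nil => rfl
  | cons e rest ih =>
      simp only [List.foldl_cons, List.filter_cons]
      by_cases hk : keyOf e = k
      · subst hk
        simp only [beq_self_eq_true, if_pos, List.flatMap_cons, List.foldl_append]
        rw [ih, PySem.Dict.getD_insert]
        simp [PySem.Dict.getD_setdefault_self]
      · have hne : (keyOf e == k) = false := by simp [hk]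
        simp only [hne, Bool.false_eq_true, if_neg, not_false_iff]
        rw [ih, PySem.Dict.getD_insert, if_neg (fun h => hk h.symm)]
        rw [PySem.Dict.getD_eq_get?_getD, PySem.Dict.get?_setdefault_of_ne _ _ (fun h => hk h.symm),
          ← PySem.Dict.getD_eq_get?_getD]

-- resolveIds splits over append (the early None is absorbing = Option.bind)
theorem resolveIds_append (short : String) (l1 l2 : List String) (f : Option String) :
    resolveIds short (l1 ++ l2) f = (resolveIds short l1 f).bind (resolveIds short l2) := by
  induction l1 generalizing f with
  | nil => rfl
  | cons x rest ih =>
      simp only [List.cons_append, resolveIds]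
      by_cases h : (PySem.Str.isIn "." x && terminalOf x == short) = true
      · simp only [h, if_pos]
        cases f with
        | none => exact ih _
        | some g =>
            by_cases hg : g = x
            · simp only [hg, if_pos]; exact ih _
            · simp [hg]
      · simp only [h, Bool.false_eq_true, if_neg, not_false_iff]
        exact ih f

-- B's outer loop = the inner loop run over the concatenation of the same-key entries' ids
theorem resolveEntries_eq (language scope short : String)
    (rc : List (String × String × String × List String)) (f : Option String) :
    resolveEntries language scope short rc f
      = (resolveIds short
          ((rc.filter (fun e => keyOf e == (language, scope))).flatMap (fun e => e.2.2.2)) f).join := by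
  induction rc generalizing f with
  | nil => cases f <;> rfl
  | cons e rest ih =>
      have hcond : (keyOf e == (language, scope))
          = (e.1 == language && module_scope_for_call e.2.1 e.2.2.1 == scope) := by
        simp only [keyOf, BEq.beq]
        congr 1
      simp only [resolveEntries, List.filter_cons, hcond]
      by_cases h : (e.1 == language && module_scope_for_call e.2.1 e.2.2.1 == scope) = true
      · simp only [h, if_pos, List.flatMap_cons, resolveIds_append]
        cases hi : resolveIds short e.2.2.2 f with
        | none => rfl
        | some g => simpa using ih g
      · simp only [h, Bool.false_eq_true, if_neg, not_false_iff]
        exact ih f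

-- once A's bucket holds the conflict sentinel at i, it stays there
theorem stepA_conflict (L : List String) (b : PySem.Dict String (Option String)) (i : String)
    (h : b.get? i = some none) : (L.foldl stepA b).get? i = some none := by
  induction L generalizing b with
  | nil => exact h
  | cons full rest ih =>
      simp only [List.foldl_cons]
      apply ih
      by_cases hd : PySem.Str.isIn "." full = true
      · by_cases ht : terminalOf full = i
        · have : stepA b full = b := by
            simp only [stepA, hd, if_pos, ht, h]
          rw [this]; exact h
        · cases hb : b.get? (terminalOf full) with
          | none =>
              have : stepA b full = b.insert (terminalOf full) (some full) := by
                simp only [stepA, hd, if_pos, hb]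
              rw [this, PySem.Dict.get?_insert_of_ne _ _ (fun hh => ht hh.symm)]; exact h
          | some o =>
              cases o with
              | none =>
                  have : stepA b full = b := by simp only [stepA, hd, if_pos, hb]
                  rw [this]; exact h
              | some ex =>
                  by_cases hx : ex = full
                  · have : stepA b full = b := by
                      simp only [stepA, hd, if_pos, hb, hx, ne_eq, not_true_eq_false,
                        if_neg, not_false_iff]
                    rw [this]; exact h
                  · have : stepA b full = b.insert (terminalOf full) none := by
                      simp only [stepA, hd, if_pos, hb, ne_eq, hx, not_false_iff, if_pos]
                    rw [this, PySem.Dict.get?_insert_of_ne _ _ (fun hh => ht hh.symm)]; exact h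
      · have hd' : PySem.Str.isIn "." full = false := by
          cases hb : PySem.Str.isIn "." full with
          | false => rfl
          | true => exact absurd hb hd
        have : stepA b full = b := by simp only [stepA, hd', Bool.false_eq_true, if_neg,
          not_false_iff]
        rw [this]; exact h

-- the invariant: A's bucket entry at i tracks B's scan state (absent ↦ none, present v ↦ some v,
-- sentinel ↦ early-returned none)
theorem bucket_eq_scan (L : List String) (b : PySem.Dict String (Option String)) (i : String)
    (f : Option String) (h : b.get? i = f.map some) :
    (L.foldl stepA b).get? i
      = match resolveIds i L f with
        | some none => none
        | some (some v) => some (some v)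
        | none => some none := by
  induction L generalizing b f with
  | nil =>
      simp only [List.foldl_nil, resolveIds, h]
      cases f <;> rfl
  | cons full rest ih =>
      simp only [List.foldl_cons]
      by_cases hc : (PySem.Str.isIn "." full && terminalOf full == i) = true
      · have hd : PySem.Str.isIn "." full = true := ((Bool.and_eq_true _ _).mp hc).1
        have ht : terminalOf full = i := beq_iff_eq.mp ((Bool.and_eq_true _ _).mp hc).2
        cases f with
        | none =>
            have hb0 : b.get? i = none := by simpa using h
            have hs : stepA b full = b.insert i (some full) := by
              simp only [stepA, hd, if_pos, ht, hb0]
            have hres : resolveIds i (full :: rest) none = resolveIds i rest (some full) := by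
              simp only [resolveIds, hc, if_pos]
            rw [hs, hres]
            exact ih _ (some full) (by rw [PySem.Dict.get?_insert_self]; rfl)
        | some v =>
            have hbv : b.get? i = some (some v) := by simpa using h
            by_cases hv : v = full
            · have hs : stepA b full = b := by
                simp only [stepA, hd, if_pos, ht, hbv, hv, ne_eq, not_true_eq_false, if_neg,
                  not_false_iff]
              have hres : resolveIds i (full :: rest) (some v)
                  = resolveIds i rest (some v) := by
                simp only [resolveIds, hc, if_pos, hv]
              rw [hs, hres]
              exact ih _ (some v) h
            · have hs : stepA b full = b.insert i none := by
                simp only [stepA, hd, if_pos, ht, hbv, ne_eq, hv, not_false_iff, if_pos]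
              have hres : resolveIds i (full :: rest) (some v) = none := by
                simp only [resolveIds, hc, if_pos, hv, if_neg, not_false_iff]
              rw [hs, hres]
              exact stepA_conflict _ _ _ (by rw [PySem.Dict.get?_insert_self])
      · have hres : resolveIds i (full :: rest) f = resolveIds i rest f := by
          simp only [resolveIds, hc, Bool.false_eq_true, if_neg, not_false_iff]
        have hs : (stepA b full).get? i = b.get? i := by
          by_cases hd : PySem.Str.isIn "." full = true
          · have ht : terminalOf full ≠ i := by
              intro hti
              rw [Bool.and_eq_true] at hc
              exact hc ⟨hd, beq_iff_eq.mpr hti⟩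
            cases hb : b.get? (terminalOf full) with
            | none =>
                have : stepA b full = b.insert (terminalOf full) (some full) := by
                  simp only [stepA, hd, if_pos, hb]
                rw [this, PySem.Dict.get?_insert_of_ne _ _ (fun hh => ht hh.symm)]
            | some o =>
                cases o with
                | none =>
                    have : stepA b full = b := by simp only [stepA, hd, if_pos, hb]
                    rw [this]
                | some ex =>
                    by_cases hx : ex = full
                    · have : stepA b full = b := by
                        simp only [stepA, hd, if_pos, hb, hx, ne_eq, not_true_eq_false,
                          if_neg, not_false_iff]
                      rw [this]
                    · have : stepA b full = b.insert (terminalOf full) none := by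
                        simp only [stepA, hd, if_pos, hb, ne_eq, hx, not_false_iff, if_pos]
                      rw [this, PySem.Dict.get?_insert_of_ne _ _ (fun hh => ht hh.symm)]
          · have hd' : PySem.Str.isIn "." full = false := by
              cases hb : PySem.Str.isIn "." full with
              | false => rfl
              | true => exact absurd hb hd
            have : stepA b full = b := by simp only [stepA, hd', Bool.false_eq_true, if_neg,
              not_false_iff]
            rw [this]
        rw [hres]
        exact ih _ f (hs.trans h)

-- per-identifier agreement of the two lookup mechanisms
theorem apply_eq (rc : List (String × String × String × List String)) (e : String × String × String × List String)
    (i : String) :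
    applyA ((firstPassA rc).getD (keyOf e) PySem.Dict.empty) i
      = (if PySem.Str.isIn "." i then i
         else
           match resolve_short rc e.1 (module_scope_for_call e.2.1 e.2.2.1) i with
           | some v => if v = "" then i else v
           | none => i) := by
  simp only [applyA]
  by_cases hdot : PySem.Str.isIn "." i = true
  · rw [if_pos hdot, if_pos hdot]
  · rw [if_neg hdot, if_neg hdot]
    have hA : (firstPassA rc).getD (keyOf e) PySem.Dict.empty
        = ((rc.filter (fun e' => keyOf e' == keyOf e)).flatMap (fun e' => e'.2.2.2)).foldl stepA
            PySem.Dict.empty := by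
      have := pass_getD stepA rc PySem.Dict.empty (keyOf e) PySem.Dict.empty
      simpa [firstPassA] using this
    have hB : resolve_short rc e.1 (module_scope_for_call e.2.1 e.2.2.1) i
        = (resolveIds i
            ((rc.filter (fun e' => keyOf e' == keyOf e)).flatMap (fun e' => e'.2.2.2)) none).join := by
      have := resolveEntries_eq e.1 (module_scope_for_call e.2.1 e.2.2.1) i rc none
      simpa [resolve_short, keyOf] using this
    set L := (rc.filter (fun e' => keyOf e' == keyOf e)).flatMap (fun e' => e'.2.2.2) with hL
    have hbk := bucket_eq_scan L PySem.Dict.empty i none (by simp [PySem.Dict.get?_empty])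
    rw [hA, hbk, hB]
    cases hr : resolveIds i L none with
    | none => simp
    | some o => cases o <;> simp

-- ===== VERDICT (by name: the statement is the Claim_ definition above) =====
theorem normalize_call_identifiers_spec : Claim_equal_normalize_call_identifiers := by
  intro rc _
  show normalize_call_identifiers rc = normalize_call_identifiers_alt rc
  simp only [normalize_call_identifiers, normalize_call_identifiers_alt]
  rw [PySem.List.foldl_append_singleton_eq_map (f := secondA (firstPassA rc)) rc []]
  simp only [List.nil_append]
  apply List.map_congr_left
  intro e _
  simp only [secondA, Prod.mk.injEq, true_and]
  rw [PySem.List.foldl_append_singleton_eq_map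
        (f := applyA ((firstPassA rc).getD (keyOf e) PySem.Dict.empty)) e.2.2.2 []]
  simp only [List.nil_append]
  exact List.map_congr_left (fun i _ => apply_eq rc e i)
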